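-- pv_equiv track=rewrite | github.com/tjkpolisher/Baekjoon | 20240514_1072.py | minimum_additional_games
-- ===== SOURCE A (Python) =====
-- def calculate_win_rate(X, Y):
--     return (Y * 100) // X
--
-- def minimum_additional_games(X, Y):
--     current_win_rate = calculate_win_rate(X, Y)
--     if current_win_rate >= 99:
--         return -1
--
--     left, right = 1, 1000000000
--     result = -1
--
--     while left <= right:
--         mid = (left + right) // 2
--         new_X = X + mid
--         new_Y = Y + mid
--         new_win_rate = calculate_win_rate(new_X, new_Y)
--
--         if new_win_rate > current_win_rate:
--             result = mid
--             right = mid - 1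
--         else:
--             left = mid + 1
--
--     return result
-- ===== SOURCE B (Python) =====
-- def minimum_additional_games(X, Y):
--     z = (Y * 100) // X
--     if z >= 99:
--         return -1
--     # smallest m with 100*(Y+m) // (X+m) > z, i.e. 100*(Y+m) >= (z+1)*(X+m),
--     # i.e. (99-z)*m >= (z+1)*X - 100*Y: ceiling division, no search needed.
--     num = (z + 1) * X - Y * 100
--     den = 99 - z
--     ans = -(-num // den)
--     return ans if ans <= 1000000000 else -1
-- ===== Notes on version B (the rewrite author's own statement) =====
-- stated objective: faster
-- what changed: Replaces the binary search over [1,10^9] with a closed-form ceiling division derived from the inequality 100*(Y+m) >= (z+1)*(X+m), keeping the -1 answer when the minimum exceeds the 10^9 search bound.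
-- outside the precondition, e.g. on minimum_additional_games(-1904597345, -1754129965): A returns -1, B returns -244936655; on minimum_additional_games(-3, 1): A raises ZeroDivisionError, B returns 0
import Mathlib
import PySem

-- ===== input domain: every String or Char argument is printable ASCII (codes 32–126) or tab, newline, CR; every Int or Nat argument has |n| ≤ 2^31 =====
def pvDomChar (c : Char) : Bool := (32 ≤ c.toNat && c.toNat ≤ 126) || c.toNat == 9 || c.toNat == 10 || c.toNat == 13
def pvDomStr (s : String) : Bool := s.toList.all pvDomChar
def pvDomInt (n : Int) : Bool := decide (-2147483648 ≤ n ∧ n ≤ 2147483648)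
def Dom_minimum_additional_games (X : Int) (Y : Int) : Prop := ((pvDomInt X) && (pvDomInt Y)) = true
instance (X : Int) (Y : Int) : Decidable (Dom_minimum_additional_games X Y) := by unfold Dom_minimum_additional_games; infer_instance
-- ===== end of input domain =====

-- B replaces A's binary search over [1,10^9] with a closed-form ceiling division (objective: faster, O(1) vs O(log) floordivs).

-- ===== PORT A =====
def calculate_win_rate (X : Int) (Y : Int) : Int := PySem.Int.floordiv (Y * 100) X

def agLoop (X : Int) (Y : Int) (cur : Int) (left : Int) (right : Int) (result : Int) : Int :=
  if h : left ≤ right then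
    let mid := PySem.Int.floordiv (left + right) 2
    let newX := X + mid
    let newY := Y + mid
    let newRate := calculate_win_rate newX newY
    if newRate > cur then agLoop X Y cur left (mid - 1) mid
    else agLoop X Y cur (mid + 1) right result
  else result
termination_by (right + 1 - left).toNat
decreasing_by
  all_goals
    have hb := PySem.Int.floordiv_two_mid_bounds h
    omega

def minimum_additional_games (X : Int) (Y : Int) : Int :=
  let current_win_rate := calculate_win_rate X Y
  if current_win_rate ≥ 99 then -1
  else agLoop X Y current_win_rate 1 1000000000 (-1)

-- ===== PORT B =====
def minimum_additional_games_alt (X : Int) (Y : Int) : Int :=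
  let z := PySem.Int.floordiv (Y * 100) X
  if z ≥ 99 then -1
  else
    let num := (z + 1) * X - Y * 100
    let den := 99 - z
    let ans := -(PySem.Int.floordiv (-num) den)
    if ans ≤ 1000000000 then ans else -1

-- ===== PRECONDITION & SPEC =====
-- Pre_ excludes X ≤ 0 with win rate below 99 (outside the problem's natural domain of a positive
-- game count): there A's binary search divides by X+mid of arbitrary sign, so A raises
-- ZeroDivisionError on many such inputs and on the rest returns -1 accidentally from a
-- non-monotone search; B returns the value of its formula there.
def Pre_minimum_additional_games (X : Int) (Y : Int) : Prop :=
  1 ≤ X ∨ 99 ≤ PySem.Int.floordiv (Y * 100) X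
instance (X : Int) (Y : Int) : Decidable (Pre_minimum_additional_games X Y) := by unfold Pre_minimum_additional_games; infer_instance

def pvWitness_minimum_additional_games : Int × Int := (10, 7)

def Spec_minimum_additional_games (X : Int) (Y : Int) (out : Int) : Prop := out = minimum_additional_games_alt X Y
instance (X : Int) (Y : Int) (out : Int) : Decidable (Spec_minimum_additional_games X Y out) := by unfold Spec_minimum_additional_games; infer_instance

-- ===== CLAIM (what is proved, stated in full; the proofs are below) =====
def Claim_equal_minimum_additional_games : Prop := ∀ (X : Int) (Y : Int), Dom_minimum_additional_games X Y → Pre_minimum_additional_games X Y → Spec_minimum_additional_games X Y (minimum_additional_games X Y)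

-- ===== LEMMAS AND PROOFS =====

-- the closed-form answer, as computed by B
def pvAns (X : Int) (Y : Int) : Int :=
  -(PySem.Int.floordiv (-((calculate_win_rate X Y + 1) * X - Y * 100)) (99 - calculate_win_rate X Y))

lemma pvAns_le_iff (X Y m : Int) (hZ : calculate_win_rate X Y < 99) :
    pvAns X Y ≤ m ↔ (calculate_win_rate X Y + 1) * X - Y * 100 ≤ (99 - calculate_win_rate X Y) * m := by
  have hden : (0:Int) < 99 - calculate_win_rate X Y := by omega
  unfold pvAns
  have h1 : -m ≤ PySem.Int.floordiv (-((calculate_win_rate X Y + 1) * X - Y * 100))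
        (99 - calculate_win_rate X Y) ↔
      -m * (99 - calculate_win_rate X Y) ≤ -((calculate_win_rate X Y + 1) * X - Y * 100) :=
    PySem.Int.le_floordiv_iff_mul_le hden
  constructor
  · intro h
    have := h1.mp (by omega)
    nlinarith
  · intro h
    have := h1.mpr (by nlinarith)
    omega

lemma pred_iff (X Y m : Int) (hX : 1 ≤ X) (hm : 1 ≤ m) (hZ : calculate_win_rate X Y < 99) :
    (calculate_win_rate (X + m) (Y + m) > calculate_win_rate X Y ↔ pvAns X Y ≤ m) := by
  have hXm : (0:Int) < X + m := by omega
  rw [pvAns_le_iff X Y m hZ]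
  unfold calculate_win_rate
  have h1 : PySem.Int.floordiv (Y * 100) X + 1 ≤ PySem.Int.floordiv ((Y + m) * 100) (X + m) ↔
      (PySem.Int.floordiv (Y * 100) X + 1) * (X + m) ≤ (Y + m) * 100 :=
    PySem.Int.le_floordiv_iff_mul_le hXm
  constructor
  · intro h
    have := h1.mp (by omega)
    nlinarith
  · intro h
    have := h1.mpr (by nlinarith)
    omega

lemma pvAns_pos (X Y : Int) (hX : 1 ≤ X) (hZ : calculate_win_rate X Y < 99) : 1 ≤ pvAns X Y := by
  by_contra h
  have h0 : pvAns X Y ≤ 0 := by omega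
  have := (pvAns_le_iff X Y 0 hZ).mp h0
  have h2 : calculate_win_rate X Y + 1 ≤ PySem.Int.floordiv (Y * 100) X :=
    (PySem.Int.le_floordiv_iff_mul_le (by omega : (0:Int) < X)).mpr (by nlinarith)
  unfold calculate_win_rate at h2
  unfold calculate_win_rate at hZ
  omega

lemma agLoop_above (X Y : Int) (hX : 1 ≤ X) (hZ : calculate_win_rate X Y < 99) :
    ∀ (n : Nat) (left right result : Int), (right + 1 - left).toNat ≤ n → 1 ≤ left →
      right < pvAns X Y → agLoop X Y (calculate_win_rate X Y) left right result = result := by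
  intro n
  induction n with
  | zero =>
    intro left right result hn hl hr
    rw [agLoop, dif_neg (by omega : ¬ left ≤ right)]
  | succ n ih =>
    intro left right result hn hl hr
    rw [agLoop]
    by_cases h : left ≤ right
    · simp only [dif_pos h]
      have hb := PySem.Int.floordiv_two_mid_bounds h
      set mid := PySem.Int.floordiv (left + right) 2 with hmid
      have hnp : ¬ (calculate_win_rate (X + mid) (Y + mid) > calculate_win_rate X Y) := by
        rw [pred_iff X Y mid hX (by omega) hZ]; omega
      simp only [if_neg hnp]
      exact ih (mid + 1) right result (by omega) (by omega) hr
    · simp only [dif_neg h]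

lemma agLoop_find (X Y : Int) (hX : 1 ≤ X) (hZ : calculate_win_rate X Y < 99) :
    ∀ (n : Nat) (left right result : Int), (right + 1 - left).toNat ≤ n → 1 ≤ left →
      left ≤ pvAns X Y → pvAns X Y ≤ right →
      agLoop X Y (calculate_win_rate X Y) left right result = pvAns X Y := by
  intro n
  induction n with
  | zero =>
    intro left right result hn hl hla hr
    omega
  | succ n ih =>
    intro left right result hn hl hla hr
    have h : left ≤ right := by omega
    rw [agLoop]
    simp only [dif_pos h]
    have hb := PySem.Int.floordiv_two_mid_bounds h
    set mid := PySem.Int.floordiv (left + right) 2 with hmid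
    by_cases hp : pvAns X Y ≤ mid
    · have hyes : calculate_win_rate (X + mid) (Y + mid) > calculate_win_rate X Y := by
        rw [pred_iff X Y mid hX (by omega) hZ]; exact hp
      simp only [if_pos hyes]
      by_cases hstep : pvAns X Y ≤ mid - 1
      · exact ih left (mid - 1) mid (by omega) hl hla hstep
      · have heq : pvAns X Y = mid := by omega
        rw [agLoop_above X Y hX hZ n left (mid - 1) mid (by omega) hl (by omega), heq]
    · have hno : ¬ (calculate_win_rate (X + mid) (Y + mid) > calculate_win_rate X Y) := by
        rw [pred_iff X Y mid hX (by omega) hZ]; exact hp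
      simp only [if_neg hno]
      exact ih (mid + 1) right result (by omega) (by omega) (by omega) hr

lemma main_eq (X Y : Int) (hPre : Pre_minimum_additional_games X Y) :
    minimum_additional_games X Y = minimum_additional_games_alt X Y := by
  unfold minimum_additional_games minimum_additional_games_alt
  by_cases hZ : calculate_win_rate X Y ≥ 99
  · have hz' : PySem.Int.floordiv (Y * 100) X ≥ 99 := hZ
    simp only [if_pos hZ, if_pos hz']
  · have hX : 1 ≤ X := by
      rcases hPre with h | h
      · exact h
      · exact absurd h (by unfold calculate_win_rate at hZ; omega)
    have hz' : ¬ PySem.Int.floordiv (Y * 100) X ≥ 99 := hZ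
    simp only [if_neg hZ, if_neg hz']
    have hZlt : calculate_win_rate X Y < 99 := by omega
    have hans : -(PySem.Int.floordiv (-((PySem.Int.floordiv (Y * 100) X + 1) * X - Y * 100))
        (99 - PySem.Int.floordiv (Y * 100) X)) = pvAns X Y := rfl
    rw [hans]
    have hpos := pvAns_pos X Y hX hZlt
    by_cases hcap : pvAns X Y ≤ 1000000000
    · rw [if_pos hcap]
      exact agLoop_find X Y hX hZlt 1000000000 1 1000000000 (-1)
        (by omega) (by omega) hpos hcap
    · rw [if_neg hcap]
      exact agLoop_above X Y hX hZlt 1000000000 1 1000000000 (-1)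
        (by omega) (by omega) (by omega)

-- ===== VERDICT (by name: the statement is the Claim_ definition above) =====
theorem minimum_additional_games_spec : Claim_equal_minimum_additional_games := by
  intro X Y _hDom hPre
  unfold Spec_minimum_additional_games
  exact main_eq X Y hPre
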